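-- pv_equiv track=rewrite | github.com/dayotunde25/MetaGen | app/services/nlp_service.py | _create_dynamic_usecase_prompt
-- ===== SOURCE A (Python) =====
-- from typing import List, Dict, Any, Optional
--
-- def _create_dynamic_usecase_prompt(title: str, keywords: List[str], entities: List[str], summary: str, category: str = "General") -> str:
--     """Create dynamic use case prompt for T5"""
--     # Extract domain context from keywords and entities
--     domain_indicators = {
--         'business': ['sales', 'customer', 'revenue', 'profit', 'marketing', 'commerce', 'transaction'],
--         'healthcare': ['patient', 'medical', 'clinical', 'diagnosis', 'treatment', 'health', 'hospital'],
--         'finance': ['financial', 'investment', 'banking', 'credit', 'loan', 'portfolio', 'trading'],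
--         'research': ['research', 'study', 'experiment', 'analysis', 'scientific', 'academic'],
--         'technology': ['software', 'system', 'network', 'database', 'algorithm', 'programming'],
--         'education': ['student', 'course', 'learning', 'education', 'academic', 'university']
--     }
--
--     # Determine domain from keywords
--     detected_domains = []
--     all_terms = keywords + entities if entities else keywords
--     for domain, indicators in domain_indicators.items():
--         if any(indicator.lower() in [term.lower() for term in all_terms] for indicator in indicators):
--             detected_domains.append(domain)
--
--     # Create domain-specific use cases
--     if 'business' in detected_domains:
--         use_cases = "business intelligence, customer analytics, sales forecasting, market research, and performance optimization"
--     elif 'healthcare' in detected_domains: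
--         use_cases = "medical research, patient outcome analysis, clinical decision support, epidemiological studies, and healthcare quality improvement"
--     elif 'finance' in detected_domains:
--         use_cases = "risk assessment, fraud detection, investment analysis, credit scoring, and financial modeling"
--     elif 'research' in detected_domains:
--         use_cases = "academic research, statistical analysis, hypothesis testing, data mining, and scientific discovery"
--     elif 'technology' in detected_domains:
--         use_cases = "system optimization, performance monitoring, software analytics, network analysis, and technical research"
--     else:
--         use_cases = "data analysis, statistical modeling, research applications, decision support, and analytical insights"
--
--     # Include key entities for context
--     entity_context = ""
--     if entities and len(entities) > 0:
--         key_entities = entities[:3] if isinstance(entities, list) else [str(entities)]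
--         entity_context = f" involving {', '.join(key_entities)}"
--
--     return f"explain applications: {title} dataset{entity_context} can be used for {use_cases}. Describe specific analytical methods and research applications."
-- ===== SOURCE B (Python) =====
-- # Single ordered table of the five branch-bearing domains (education has no
-- # branch in the original and thus no row); first row whose indicator set
-- # intersects the lowercased terms wins, else the default string.
--
-- _TABLE = [
--     (frozenset(['sales', 'customer', 'revenue', 'profit', 'marketing', 'commerce', 'transaction']),
--      "business intelligence, customer analytics, sales forecasting, market research, and performance optimization"),
--     (frozenset(['patient', 'medical', 'clinical', 'diagnosis', 'treatment', 'health', 'hospital']),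
--      "medical research, patient outcome analysis, clinical decision support, epidemiological studies, and healthcare quality improvement"),
--     (frozenset(['financial', 'investment', 'banking', 'credit', 'loan', 'portfolio', 'trading']),
--      "risk assessment, fraud detection, investment analysis, credit scoring, and financial modeling"),
--     (frozenset(['research', 'study', 'experiment', 'analysis', 'scientific', 'academic']),
--      "academic research, statistical analysis, hypothesis testing, data mining, and scientific discovery"),
--     (frozenset(['software', 'system', 'network', 'database', 'algorithm', 'programming']),
--      "system optimization, performance monitoring, software analytics, network analysis, and technical research"),
-- ]
--
-- _DEFAULT = "data analysis, statistical modeling, research applications, decision support, and analytical insights"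
--
--
-- def _create_dynamic_usecase_prompt(title, keywords, entities, summary, category="General"):
--     terms = {t.lower() for t in (keywords + entities if entities else keywords)}
--     use_cases = next((uc for inds, uc in _TABLE if inds & terms), _DEFAULT)
--     ctx = f" involving {', '.join(entities[:3])}" if entities else ""
--     return (f"explain applications: {title} dataset{ctx} can be used for {use_cases}. "
--             f"Describe specific analytical methods and research applications.")
-- ===== Notes on version B (the rewrite author's own statement) =====
-- stated objective: faster
-- what changed: Replaces A's two phases (a detection loop that re-lowers the whole term list for every indicator, then a six-way if/elif chain) with a lowered term set built once and a single ordered five-row table of (indicator frozenset, use_cases) scanned for the first intersecting row; the dead 'education' branch disappears.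
import Mathlib
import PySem

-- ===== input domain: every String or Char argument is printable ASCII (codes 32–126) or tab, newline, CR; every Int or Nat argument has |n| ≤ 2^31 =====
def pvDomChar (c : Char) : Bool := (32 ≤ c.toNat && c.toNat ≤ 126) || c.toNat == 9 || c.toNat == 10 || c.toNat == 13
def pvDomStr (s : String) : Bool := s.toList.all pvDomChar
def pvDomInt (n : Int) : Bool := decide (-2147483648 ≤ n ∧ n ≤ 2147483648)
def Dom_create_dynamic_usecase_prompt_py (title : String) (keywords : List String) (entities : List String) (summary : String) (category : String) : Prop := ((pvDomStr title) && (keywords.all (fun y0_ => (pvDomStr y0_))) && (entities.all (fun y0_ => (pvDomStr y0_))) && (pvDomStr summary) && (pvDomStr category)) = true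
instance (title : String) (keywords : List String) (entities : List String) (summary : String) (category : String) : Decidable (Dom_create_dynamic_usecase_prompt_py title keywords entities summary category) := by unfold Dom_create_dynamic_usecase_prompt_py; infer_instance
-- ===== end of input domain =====

-- B replaces A's per-domain detection loop + six-way elif chain by a single ordered
-- five-row table scanned once for the first row whose indicator set meets the
-- lowercased terms (objective: simpler).

-- ===== PORT A =====
-- detected_domains loop over the domain_indicators dict (literal order)
def pyA_detect (all_terms : List String) : List String :=
  [("business", ["sales", "customer", "revenue", "profit", "marketing", "commerce", "transaction"]),
     ("healthcare", ["patient", "medical", "clinical", "diagnosis", "treatment", "health", "hospital"]),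
     ("finance", ["financial", "investment", "banking", "credit", "loan", "portfolio", "trading"]),
     ("research", ["research", "study", "experiment", "analysis", "scientific", "academic"]),
     ("technology", ["software", "system", "network", "database", "algorithm", "programming"]),
     ("education", ["student", "course", "learning", "education", "academic", "university"])].foldl
    (fun acc p =>
      if p.2.any (fun ind => (all_terms.map (fun t => PySem.Str.lower t)).contains (PySem.Str.lower ind)) then
        acc ++ [p.1]
      else acc) []

-- the if/elif chain choosing use_cases
def pyA_usecases (detected : List String) : String :=
    if detected.contains "business" then "business intelligence, customer analytics, sales forecasting, market research, and performance optimization"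
    else if detected.contains "healthcare" then "medical research, patient outcome analysis, clinical decision support, epidemiological studies, and healthcare quality improvement"
    else if detected.contains "finance" then "risk assessment, fraud detection, investment analysis, credit scoring, and financial modeling"
    else if detected.contains "research" then "academic research, statistical analysis, hypothesis testing, data mining, and scientific discovery"
    else if detected.contains "technology" then "system optimization, performance monitoring, software analytics, network analysis, and technical research"
    else "data analysis, statistical modeling, research applications, decision support, and analytical insights"

def create_dynamic_usecase_prompt_py (title : String) (keywords : List String) (entities : List String) (summary : String) (category : String) : String :=
  let all_terms := if entities ≠ [] then keywords ++ entities else keywords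
  let detected_domains := pyA_detect all_terms
  let use_cases := pyA_usecases detected_domains
  let entity_context :=
    if entities ≠ [] ∧ entities.length > 0 then
      " involving " ++ PySem.Str.join ", " (PySem.List.slice entities none (some 3))
    else ""
  "explain applications: " ++ title ++ " dataset" ++ entity_context ++ " can be used for " ++ use_cases ++ ". Describe specific analytical methods and research applications."

-- ===== PORT B =====
-- the module-level _TABLE of (indicator frozenset, use_cases) rows, in priority order
def pvTable : List (PySem.Set String × String) :=
    [(PySem.Set.ofList ["sales", "customer", "revenue", "profit", "marketing", "commerce", "transaction"], "business intelligence, customer analytics, sales forecasting, market research, and performance optimization"),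
     (PySem.Set.ofList ["patient", "medical", "clinical", "diagnosis", "treatment", "health", "hospital"], "medical research, patient outcome analysis, clinical decision support, epidemiological studies, and healthcare quality improvement"),
     (PySem.Set.ofList ["financial", "investment", "banking", "credit", "loan", "portfolio", "trading"], "risk assessment, fraud detection, investment analysis, credit scoring, and financial modeling"),
     (PySem.Set.ofList ["research", "study", "experiment", "analysis", "scientific", "academic"], "academic research, statistical analysis, hypothesis testing, data mining, and scientific discovery"),
     (PySem.Set.ofList ["software", "system", "network", "database", "algorithm", "programming"], "system optimization, performance monitoring, software analytics, network analysis, and technical research")]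

def pvDefault : String := "data analysis, statistical modeling, research applications, decision support, and analytical insights"

def create_dynamic_usecase_prompt_py_alt (title : String) (keywords : List String) (entities : List String) (summary : String) (category : String) : String :=
  let terms : PySem.Set String :=
    PySem.Set.ofList ((if entities ≠ [] then keywords ++ entities else keywords).map (fun t => PySem.Str.lower t))
  let use_cases :=
    ((pvTable.find? (fun p => !(PySem.Set.inter p.1 terms).isEmpty)).map (fun p => p.2)).getD pvDefault
  let ctx :=
    if entities ≠ [] then " involving " ++ PySem.Str.join ", " (PySem.List.slice entities none (some 3)) else ""
  "explain applications: " ++ title ++ " dataset" ++ ctx ++ " can be used for " ++ use_cases ++ ". Describe specific analytical methods and research applications."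

-- ===== PRECONDITION & SPEC =====
def Spec_create_dynamic_usecase_prompt_py (title : String) (keywords : List String) (entities : List String) (summary : String) (category : String) (out : String) : Prop := out = create_dynamic_usecase_prompt_py_alt title keywords entities summary category
instance (title : String) (keywords : List String) (entities : List String) (summary : String) (category : String) (out : String) : Decidable (Spec_create_dynamic_usecase_prompt_py title keywords entities summary category out) := by unfold Spec_create_dynamic_usecase_prompt_py; infer_instance

-- ===== CLAIM (what is proved, stated in full; the proofs are below) =====
def Claim_equal_create_dynamic_usecase_prompt_py : Prop := ∀ (title : String) (keywords : List String) (entities : List String) (summary : String) (category : String), Dom_create_dynamic_usecase_prompt_py title keywords entities summary category → Spec_create_dynamic_usecase_prompt_py title keywords entities summary category (create_dynamic_usecase_prompt_py title keywords entities summary category)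

-- ===== LEMMAS AND PROOFS =====

-- "some indicator of inds occurs among the terms L"
def pvHit (L inds : List String) : Bool := inds.any (fun i => L.contains i)

-- A's per-row test equals pvHit when every indicator is already lowercase
lemma rowA_gen (L inds : List String) (h : inds.all (fun x => PySem.Str.lower x == x) = true) :
    inds.any (fun ind => L.contains (PySem.Str.lower ind)) = pvHit L inds := by
  unfold pvHit
  induction inds with
  | nil => rfl
  | cons a t ih =>
    simp only [List.all_cons, Bool.and_eq_true, beq_iff_eq] at h
    simp only [List.any_cons, h.1, ih h.2]

-- B's per-row test (nonempty intersection of the two sets) equals pvHit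
lemma pv_inter_any (inds L : List String) :
    (!(PySem.Set.inter (PySem.Set.ofList inds) (PySem.Set.ofList L)).isEmpty) = pvHit L inds := by
  unfold pvHit
  rw [Bool.eq_iff_iff]
  simp [List.eq_nil_iff_forall_not_mem, PySem.Set.mem_inter,
        PySem.Set.mem_ofList, List.any_eq_true]

-- core: A's detect-then-elif-chain equals B's first-matching-row lookup
lemma pv_pick_eq (ts : List String) :
    pyA_usecases (pyA_detect ts)
      = ((pvTable.find? (fun p =>
            !(PySem.Set.inter p.1 (PySem.Set.ofList (ts.map (fun t => PySem.Str.lower t)))).isEmpty)).map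
          (fun p => p.2)).getD pvDefault := by
  unfold pyA_detect pyA_usecases pvTable pvDefault
  simp only [List.foldl_cons, List.foldl_nil, List.find?]
  generalize ts.map (fun t => PySem.Str.lower t) = L
  simp only [pv_inter_any]
  rw [rowA_gen L ["sales", "customer", "revenue", "profit", "marketing", "commerce", "transaction"] (by decide)]
  rw [rowA_gen L ["patient", "medical", "clinical", "diagnosis", "treatment", "health", "hospital"] (by decide)]
  rw [rowA_gen L ["financial", "investment", "banking", "credit", "loan", "portfolio", "trading"] (by decide)]
  rw [rowA_gen L ["research", "study", "experiment", "analysis", "scientific", "academic"] (by decide)]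
  rw [rowA_gen L ["software", "system", "network", "database", "algorithm", "programming"] (by decide)]
  rw [rowA_gen L ["student", "course", "learning", "education", "academic", "university"] (by decide)]
  generalize pvHit L ["sales", "customer", "revenue", "profit", "marketing", "commerce", "transaction"] = c1
  generalize pvHit L ["patient", "medical", "clinical", "diagnosis", "treatment", "health", "hospital"] = c2
  generalize pvHit L ["financial", "investment", "banking", "credit", "loan", "portfolio", "trading"] = c3
  generalize pvHit L ["research", "study", "experiment", "analysis", "scientific", "academic"] = c4
  generalize pvHit L ["software", "system", "network", "database", "algorithm", "programming"] = c5
  generalize pvHit L ["student", "course", "learning", "education", "academic", "university"] = c6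
  cases c1 <;> cases c2 <;> cases c3 <;> cases c4 <;> cases c5 <;> cases c6 <;> rfl

-- A's 'entities and len(entities) > 0' is just 'entities' (nonempty)
lemma pv_ctx (entities : List String) (X : String) :
    (if entities ≠ [] ∧ entities.length > 0 then X else "")
      = (if entities ≠ [] then X else "") := by
  cases entities <;> simp

-- ===== VERDICT (by name: the statement is the Claim_ definition above) =====
theorem create_dynamic_usecase_prompt_py_spec : Claim_equal_create_dynamic_usecase_prompt_py := by
  intro title keywords entities summary category _
  unfold Spec_create_dynamic_usecase_prompt_py
  simp only [create_dynamic_usecase_prompt_py, create_dynamic_usecase_prompt_py_alt]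
  rw [pv_pick_eq, pv_ctx]
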